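-- pv_equiv track=rewrite | github.com/ydf0509/funboost | funboost/funweb/script_deploy.py | _cap_pids_to_num_processes
-- ===== SOURCE A (Python) =====
-- def _cap_pids_to_num_processes(pids, config, redis_alive):
--     """列表展示不超过配置的进程数量；优先采用 Redis 里记录的顺序（与启动时写入一致）。"""
--     expected = max(1, int((config or {}).get('num_processes', '1') or 1))
--     if len(pids) <= expected:
--         return pids
--     sset = set(int(x) for x in pids)
--     pref = []
--     seen = set()
--     for x in redis_alive:
--         p = int(x)
--         if p in sset and p not in seen:
--             seen.add(p)
--             pref.append(p)
--     if len(pref) >= expected: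
--         return pref[:expected]
--     rest = []
--     for p in pids:
--         p = int(p)
--         if p not in seen:
--             seen.add(p)
--             rest.append(p)
--     return (pref + rest)[:expected]
-- ===== SOURCE B (Python) =====
-- def _cap_pids_to_num_processes(pids, config, redis_alive):
--     """Same result via a rank table and one stable sort instead of two seen-set scans."""
--     expected = max(1, int((config or {}).get('num_processes', '1') or 1))
--     if len(pids) <= expected:
--         return pids
--     unique = list(dict.fromkeys(int(p) for p in pids))
--     redis_rank = {}
--     for i, x in enumerate(redis_alive):
--         redis_rank.setdefault(int(x), i)
--     absent = len(redis_alive)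
--     return sorted(unique, key=lambda p: redis_rank.get(p, absent))[:expected]
-- ===== Notes on version B (the rewrite author's own statement) =====
-- stated objective: alternative
-- what changed: A's two stateful seen-set loops (redis-preferred prefix, then remaining pids) with a mid-function early return are replaced by deduplicating pids once and doing a single stable sort keyed by each pid's first index in redis_alive (len(redis_alive) for absent pids), then one truncation.
import Mathlib
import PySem

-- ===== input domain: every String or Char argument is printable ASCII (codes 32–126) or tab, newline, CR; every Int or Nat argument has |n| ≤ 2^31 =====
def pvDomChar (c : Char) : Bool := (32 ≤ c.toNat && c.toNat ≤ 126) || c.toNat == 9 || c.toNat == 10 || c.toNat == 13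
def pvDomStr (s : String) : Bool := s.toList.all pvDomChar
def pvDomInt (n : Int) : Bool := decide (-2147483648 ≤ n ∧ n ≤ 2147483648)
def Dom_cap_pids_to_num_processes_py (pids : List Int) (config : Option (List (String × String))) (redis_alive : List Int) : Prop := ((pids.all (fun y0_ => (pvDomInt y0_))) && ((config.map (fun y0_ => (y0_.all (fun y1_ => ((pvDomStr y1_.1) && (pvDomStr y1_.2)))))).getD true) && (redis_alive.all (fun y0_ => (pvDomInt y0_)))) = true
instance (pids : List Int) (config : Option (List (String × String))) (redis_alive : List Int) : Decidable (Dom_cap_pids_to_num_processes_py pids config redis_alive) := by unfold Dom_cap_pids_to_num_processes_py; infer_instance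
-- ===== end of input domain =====

-- B replaces A's two seen-set accumulation loops by a dedup, a first-index rank table and one
-- stable sort keyed by redis rank (objective: simpler/alternative; not claimed faster).

-- ===== PORT A =====
-- literal transliteration of A; 'int(x)' on an int is the identity and is ported as such.
-- pref[:expected] / (pref+rest)[:expected] are ported as List.take expected.toNat (exact: expected ≥ 1).
def cap_pids_to_num_processes_py (pids : List Int) (config : Option (List (String × String))) (redis_alive : List Int) : List Int :=
  let vs := PySem.Dict.getD ⟨config.getD []⟩ "num_processes" "1"
  let expected : Int := max 1 (if vs = "" then 1 else (PySem.Int.ofStr? vs).getD 1)  -- getD 1 unreachable under Pre_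
  if (pids.length : Int) ≤ expected then pids
  else
    let sset : PySem.Set Int := PySem.Set.ofList pids
    let pr := redis_alive.foldl
      (fun (acc : PySem.Set Int × List Int) x =>
        if PySem.Set.contains sset x && !PySem.Set.contains acc.1 x then
          (PySem.Set.add acc.1 x, acc.2 ++ [x])
        else acc)
      (PySem.Set.empty, [])
    if (pr.2.length : Int) ≥ expected then pr.2.take expected.toNat
    else
      let rr := pids.foldl
        (fun (acc : PySem.Set Int × List Int) p =>
          if PySem.Set.contains acc.1 p then acc
          else (PySem.Set.add acc.1 p, acc.2 ++ [p]))
        (pr.1, [])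
      (pr.2 ++ rr.2).take expected.toNat

-- ===== PORT B =====
-- literal transliteration of Source B: dedup pids, build the first-index rank dict with setdefault,
-- then one stable sort by rank (absent pids rank len(redis_alive)) and a single truncation.
def cap_pids_to_num_processes_py_alt (pids : List Int) (config : Option (List (String × String))) (redis_alive : List Int) : List Int :=
  let vs := PySem.Dict.getD ⟨config.getD []⟩ "num_processes" "1"
  let expected : Int := max 1 (if vs = "" then 1 else (PySem.Int.ofStr? vs).getD 1)
  if (pids.length : Int) ≤ expected then pids
  else
    let unique := PySem.List.dedup pids
    let rank : PySem.Dict Int Int := (PySem.List.enumerate redis_alive 0).foldl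
      (fun d ix => PySem.Dict.setdefault d ix.2 ix.1) PySem.Dict.empty
    let absent : Int := (redis_alive.length : Int)
    (PySem.List.sorted unique (fun p => PySem.Dict.getD rank p absent) false).take expected.toNat

-- ===== PRECONDITION & SPEC =====
-- Pre_ excludes exactly the inputs on which Python's int() raises ValueError on the configured
-- 'num_processes' string (a nonempty string that is not an integer literal).
def Pre_cap_pids_to_num_processes_py (pids : List Int) (config : Option (List (String × String))) (redis_alive : List Int) : Prop :=
  let vs := PySem.Dict.getD ⟨config.getD []⟩ "num_processes" "1"
  vs = "" ∨ (PySem.Int.ofStr? vs).isSome = true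
instance (pids : List Int) (config : Option (List (String × String))) (redis_alive : List Int) : Decidable (Pre_cap_pids_to_num_processes_py pids config redis_alive) := by unfold Pre_cap_pids_to_num_processes_py; infer_instance
def pvWitness_cap_pids_to_num_processes_py : List Int × (Option (List (String × String))) × List Int :=
  ([3, 1, 3, 2], some [("num_processes", "2")], [2, 9, 3])
def Spec_cap_pids_to_num_processes_py (pids : List Int) (config : Option (List (String × String))) (redis_alive : List Int) (out : List Int) : Prop := out = cap_pids_to_num_processes_py_alt pids config redis_alive
instance (pids : List Int) (config : Option (List (String × String))) (redis_alive : List Int) (out : List Int) : Decidable (Spec_cap_pids_to_num_processes_py pids config redis_alive out) := by unfold Spec_cap_pids_to_num_processes_py; infer_instance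

-- ===== CLAIM (what is proved, stated in full; the proofs are below) =====
def Claim_equal_cap_pids_to_num_processes_py : Prop := ∀ (pids : List Int) (config : Option (List (String × String))) (redis_alive : List Int), Dom_cap_pids_to_num_processes_py pids config redis_alive → Pre_cap_pids_to_num_processes_py pids config redis_alive → Spec_cap_pids_to_num_processes_py pids config redis_alive (cap_pids_to_num_processes_py pids config redis_alive)

-- ===== LEMMAS AND PROOFS =====

-- first occurrences of a list, excluding an accumulator set s (spec for the seen-set loops and dedup)
def dExcl (s : List Int) : List Int → List Int
  | [] => []
  | x :: t => if x ∈ s then dExcl s t else x :: dExcl (x :: s) t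

-- rank of p in r: its first index, or len r if absent
def rkey (r : List Int) (p : Int) : Int :=
  match PySem.List.index? r p with
  | some n => (n : Int)
  | none => (r.length : Int)

theorem dExcl_congr (l : List Int) : ∀ (s s' : List Int), (∀ a, a ∈ s ↔ a ∈ s') → dExcl s l = dExcl s' l := by
  induction l with
  | nil => intro s s' _; rfl
  | cons x t ih =>
    intro s s' h
    by_cases hx : x ∈ s
    · simp [dExcl, hx, (h x).mp hx, ih s s' h]
    · have hx' : x ∉ s' := fun c => hx ((h x).mpr c)
      simp only [dExcl, if_neg hx, if_neg hx']
      exact congrArg _ (ih _ _ (fun a => by simp [List.mem_cons, h a]))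

theorem mem_dExcl (l : List Int) : ∀ (s : List Int) (a : Int), a ∈ dExcl s l ↔ a ∈ l ∧ a ∉ s := by
  induction l with
  | nil => simp [dExcl]
  | cons x t ih =>
    intro s a
    by_cases hx : x ∈ s
    · rw [dExcl, if_pos hx, ih]
      constructor
      · rintro ⟨h1, h2⟩; exact ⟨List.mem_cons_of_mem _ h1, h2⟩
      · rintro ⟨h1, h2⟩
        rcases List.mem_cons.mp h1 with rfl | h1
        · exact absurd hx h2
        · exact ⟨h1, h2⟩
    · rw [dExcl, if_neg hx]
      simp only [List.mem_cons, ih]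
      constructor
      · rintro (rfl | ⟨h1, h2⟩)
        · exact ⟨Or.inl rfl, hx⟩
        · exact ⟨Or.inr h1, fun c => h2 (Or.inr c)⟩
      · rintro ⟨rfl | h1, h2⟩
        · exact Or.inl rfl
        · by_cases hax : a = x
          · exact Or.inl hax
          · exact Or.inr ⟨h1, fun c => (c.elim hax h2)⟩

theorem nodup_dExcl (l : List Int) : ∀ (s : List Int), (dExcl s l).Nodup := by
  induction l with
  | nil => intro s; simp [dExcl]
  | cons x t ih =>
    intro s
    by_cases hx : x ∈ s
    · simpa [dExcl, hx] using ih s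
    · rw [dExcl, if_neg hx]
      refine List.nodup_cons.mpr ⟨?_, ih _⟩
      intro c
      exact ((mem_dExcl t _ x).mp c).2 (List.mem_cons_self)

theorem foldl_add_eq_dExcl (l : List Int) : ∀ (s : List Int), l.foldl PySem.Set.add s = s ++ dExcl s l := by
  induction l with
  | nil => intro s; simp [dExcl]
  | cons x t ih =>
    intro s
    by_cases hx : x ∈ s
    · have : PySem.Set.add s x = s := by simp [PySem.Set.add, PySem.Set.contains, hx]
      simp [List.foldl_cons, dExcl, hx, ih]
    · have : PySem.Set.add s x = s ++ [x] := by simp [PySem.Set.add, PySem.Set.contains, hx]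
      rw [List.foldl_cons, this, ih, dExcl, if_neg hx,
        dExcl_congr t (s ++ [x]) (x :: s) (by intro a; simp [List.mem_append, List.mem_cons, or_comm])]
      simp

theorem dedup_eq_dExcl (l : List Int) : PySem.List.dedup l = dExcl [] l := by
  simpa using foldl_add_eq_dExcl l []

theorem dExcl_filter (l : List Int) : ∀ (p : Int → Bool) (s s' : List Int),
    (∀ a, p a = true → (a ∈ s ↔ a ∈ s')) → dExcl s (l.filter p) = (dExcl s' l).filter p := by
  induction l with
  | nil => intro p s s' _; rfl
  | cons x t ih =>
    intro p s s' h
    by_cases hp : p x = true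
    · by_cases hx : x ∈ s'
      · have hxs : x ∈ s := (h x hp).mpr hx
        simp [hp, dExcl, hx, hxs, ih p s s' h]
      · have hxs : x ∉ s := fun c => hx ((h x hp).mp c)
        rw [List.filter_cons, if_pos hp, dExcl, if_neg hxs, dExcl, if_neg hx,
          List.filter_cons, if_pos hp]
        exact congrArg _ (ih p _ _ (fun a ha => by simp [List.mem_cons, h a ha]))
    · have hp' : p x = false := by simpa using hp
      rw [List.filter_cons, if_neg (by simp [hp'])]
      by_cases hx : x ∈ s'
      · rw [dExcl, if_pos hx]
        exact ih p s s' h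
      · rw [dExcl, if_neg hx, List.filter_cons, if_neg (by simp [hp'])]
        refine ih p s (x :: s') ?_
        intro a ha
        have hax : a ≠ x := by rintro rfl; rw [ha] at hp'; cases hp'
        simp [List.mem_cons, hax, h a ha]

theorem dExcl_eq_filter_not_mem (l : List Int) : ∀ (s' s : List Int),
    dExcl (s' ++ s) l = (dExcl s' l).filter (fun a => !decide (a ∈ s)) := by
  induction l with
  | nil => intro s' s; rfl
  | cons x t ih =>
    intro s' s
    by_cases h1 : x ∈ s'
    · simp [dExcl, h1, List.mem_append, ih]
    · by_cases h2 : x ∈ s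
      · rw [dExcl, if_pos (List.mem_append.mpr (Or.inr h2)), dExcl, if_neg h1,
          List.filter_cons, if_neg (by simp [h2])]
        rw [← ih (x :: s') s]
        refine dExcl_congr t _ _ ?_
        intro a
        simp only [List.mem_append, List.mem_cons]
        constructor
        · rintro (h | h)
          exacts [Or.inl (Or.inr h), Or.inr h]
        · rintro ((rfl | h) | h)
          exacts [Or.inr h2, Or.inl h, Or.inr h]
      · rw [dExcl, if_neg (by simp [List.mem_append, h1, h2]), dExcl, if_neg h1,
          List.filter_cons, if_pos (by simp [h2])]
        exact congrArg _ (ih (x :: s') s)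


theorem rkey_lt_of_mem {r : List Int} {p : Int} (h : p ∈ r) : rkey r p < (r.length : Int) := by
  obtain ⟨k, hk⟩ := (PySem.List.index?_isSome_iff r p).mpr h |> Option.isSome_iff_exists.mp
  obtain ⟨pre, suf, hr, hlen, _⟩ := (PySem.List.index?_eq_some_iff r p k).mp hk
  have hkl : k < r.length := by subst hr hlen; simp
  simp only [rkey, hk]
  exact_mod_cast hkl

theorem rkey_of_not_mem {r : List Int} {p : Int} (h : p ∉ r) : rkey r p = (r.length : Int) := by
  have hn : PySem.List.index? r p = none := (PySem.List.index?_eq_none_iff r p).mpr h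
  simp only [rkey, hn]

theorem rkey_cons_lt {r : List Int} {x a b : Int} (ha : a ≠ x) (hb : b ≠ x)
    (hab : rkey r a < rkey r b) (hma : a ∈ r) (hmb : b ∈ r) :
    rkey (x :: r) a < rkey (x :: r) b := by
  obtain ⟨i, hi⟩ := Option.isSome_iff_exists.mp ((PySem.List.index?_isSome_iff r a).mpr hma)
  obtain ⟨j, hj⟩ := Option.isSome_iff_exists.mp ((PySem.List.index?_isSome_iff r b).mpr hmb)
  have hia : PySem.List.index? (x :: r) a = some (i + 1) := by
    rw [PySem.List.index?_cons_of_ne r (Ne.symm ha), hi]; rfl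
  have hjb : PySem.List.index? (x :: r) b = some (j + 1) := by
    rw [PySem.List.index?_cons_of_ne r (Ne.symm hb), hj]; rfl
  have hij : (i : Int) < (j : Int) := by
    simpa only [rkey, hi, hj] using hab
  simp only [rkey, hia, hjb]
  omega

theorem pairwise_rkey_dExcl (r : List Int) : ∀ (s : List Int),
    (dExcl s r).Pairwise (fun a b => rkey r a < rkey r b) := by
  induction r with
  | nil => intro s; simp [dExcl]
  | cons x t ih =>
    intro s
    by_cases hx : x ∈ s
    · rw [dExcl, if_pos hx]
      refine ((ih s).imp_of_mem ?_)
      intro a b ha hb hab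
      obtain ⟨hat, has⟩ := (mem_dExcl t s a).mp ha
      obtain ⟨hbt, hbs⟩ := (mem_dExcl t s b).mp hb
      exact rkey_cons_lt (fun c => has (c ▸ hx)) (fun c => hbs (c ▸ hx)) hab hat hbt
    · rw [dExcl, if_neg hx]
      refine List.pairwise_cons.mpr ⟨?_, ?_⟩
      · intro b hb
        obtain ⟨hbt, hbs⟩ := (mem_dExcl t (x :: s) b).mp hb
        have hbx : b ≠ x := fun c => hbs (c ▸ List.mem_cons_self)
        obtain ⟨j, hj⟩ := Option.isSome_iff_exists.mp ((PySem.List.index?_isSome_iff t b).mpr hbt)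
        have hjb : PySem.List.index? (x :: t) b = some (j + 1) := by
          rw [PySem.List.index?_cons_of_ne t (Ne.symm hbx), hj]; rfl
        simp only [rkey, PySem.List.index?_cons_self, hjb]
        positivity
      · refine ((ih (x :: s)).imp_of_mem ?_)
        intro a b ha hb hab
        obtain ⟨hat, has⟩ := (mem_dExcl t (x :: s) a).mp ha
        obtain ⟨hbt, hbs⟩ := (mem_dExcl t (x :: s) b).mp hb
        exact rkey_cons_lt (fun c => has (c ▸ List.mem_cons_self))
          (fun c => hbs (c ▸ List.mem_cons_self)) hab hat hbt

theorem insertBy_cons (f : Int → Int → Bool) (x y : Int) (ys : List Int) :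
    PySem.List.insertBy f x (y :: ys) = if f x y then x :: y :: ys else y :: PySem.List.insertBy f x ys := rfl

theorem insertBy_of_forall_before (f : Int → Int → Bool) (x : Int) (ys : List Int)
    (h : ∀ y ∈ ys, f x y = true) : PySem.List.insertBy f x ys = x :: ys := by
  cases ys with
  | nil => rfl
  | cons y t => rw [insertBy_cons, if_pos (h y List.mem_cons_self)]

-- stability core: inserting p (present in redis) into "rank-sorted prefix ++ constant-key tail"
theorem insertBy_filter_mem (r : List Int) (p : Int) (tail : List Int)
    (htail : ∀ y ∈ tail, rkey r p < rkey r y) :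
    ∀ (l v : List Int), l.Pairwise (fun a b => rkey r a < rkey r b) → p ∈ l → p ∉ v →
    PySem.List.insertBy (fun a b => decide (rkey r a < rkey r b)) p
        (l.filter (fun x => decide (x ∈ v)) ++ tail)
      = l.filter (fun x => decide (x ∈ v ∨ x = p)) ++ tail := by
  intro l
  induction l with
  | nil => intro v _ hp; cases hp
  | cons a l' ih =>
    intro v hpw hp hpv
    have ha : ∀ b ∈ l', rkey r a < rkey r b := (List.pairwise_cons.mp hpw).1
    have hpw' : l'.Pairwise (fun a b => rkey r a < rkey r b) := (List.pairwise_cons.mp hpw).2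
    rcases List.mem_cons.mp hp with rfl | hpl'
    · -- p = a is the head: it is inserted in front of everything that remains
      have hpl' : p ∉ l' := fun c => lt_irrefl _ (ha p c)
      have hfiltr : l'.filter (fun x => decide (x ∈ v ∨ x = p)) = l'.filter (fun x => decide (x ∈ v)) := by
        refine List.filter_congr ?_
        intro x hx
        have : x ≠ p := fun c => hpl' (c ▸ hx)
        simp [this]
      rw [List.filter_cons, if_neg (by simp [hpv]), List.filter_cons, if_pos (by simp), hfiltr]
      refine insertBy_of_forall_before _ _ _ ?_
      intro y hy
      rcases List.mem_append.mp hy with hy | hy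
      · exact decide_eq_true (ha y (List.mem_of_mem_filter hy))
      · exact decide_eq_true (htail y hy)
    · have hap : a ≠ p := fun c => lt_irrefl _ (c ▸ ha p hpl')
      by_cases hav : a ∈ v
      · rw [List.filter_cons, if_pos (by simp [hav]), List.filter_cons, if_pos (by simp [hav])]
        rw [List.cons_append, insertBy_cons, if_neg (by simp; exact le_of_lt (ha p hpl'))]
        rw [ih v hpw' hpl' hpv]
        rfl
      · rw [List.filter_cons, if_neg (by simp [hav]), List.filter_cons,
          if_neg (by simp [hav]; exact hap)]
        exact ih v hpw' hpl' hpv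

-- the stable sort of the deduped pids IS "redis order prefix ++ pids order rest"
theorem sort_fold (r : List Int) :
    ∀ (u v : List Int), (v ++ u).Nodup →
    u.foldl (fun acc x => PySem.List.insertBy (fun a b => decide (rkey r a < rkey r b)) x acc)
        ((dExcl [] r).filter (fun x => decide (x ∈ v)) ++ v.filter (fun x => !decide (x ∈ r)))
      = (dExcl [] r).filter (fun x => decide (x ∈ v ++ u)) ++ (v ++ u).filter (fun x => !decide (x ∈ r)) := by
  intro u
  induction u with
  | nil => intro v _; simp
  | cons x u' ih =>
    intro v hnd
    have hnd' : ((v ++ [x]) ++ u').Nodup := by simpa [List.append_assoc] using hnd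
    have hxv : x ∉ v := by
      have hnd2 := hnd
      rw [List.nodup_append] at hnd2
      exact fun c => hnd2.2.2 x c x List.mem_cons_self rfl
    rw [List.foldl_cons]
    by_cases hxr : x ∈ r
    · have hxd : x ∈ dExcl [] r := (mem_dExcl r [] x).mpr ⟨hxr, by simp⟩
      rw [insertBy_filter_mem r x (v.filter (fun x => !decide (x ∈ r)))
        (by
          intro y hy
          have hyr : y ∉ r := by simpa using (List.of_mem_filter hy)
          rw [rkey_of_not_mem hyr]
          exact rkey_lt_of_mem hxr)
        (dExcl [] r) v (pairwise_rkey_dExcl r []) hxd hxv]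
      have e1 : (dExcl [] r).filter (fun y => decide (y ∈ v ∨ y = x))
          = (dExcl [] r).filter (fun y => decide (y ∈ v ++ [x])) := by
        refine List.filter_congr ?_; intro y _; simp
      have e2 : v.filter (fun y => !decide (y ∈ r)) = (v ++ [x]).filter (fun y => !decide (y ∈ r)) := by
        simp [List.filter_append, hxr]
      rw [e1, e2, ih (v ++ [x]) hnd']
      simp [List.append_assoc]
    · rw [PySem.List.insertBy_of_forall_not_before _ _ _
        (by
          intro y hy
          rcases List.mem_append.mp hy with hy | hy
          · have hyr : y ∈ r := ((mem_dExcl r [] y).mp (List.mem_of_mem_filter hy)).1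
            simp only [decide_eq_false_iff_not, not_lt]
            rw [rkey_of_not_mem hxr]
            exact le_of_lt (rkey_lt_of_mem hyr)
          · have hyr : y ∈ v ∧ y ∉ r := by
              constructor
              · exact List.mem_of_mem_filter hy
              · simpa using List.of_mem_filter hy
            simp only [decide_eq_false_iff_not, not_lt]
            rw [rkey_of_not_mem hxr, rkey_of_not_mem hyr.2])]
      have e1 : (dExcl [] r).filter (fun y => decide (y ∈ v))
          = (dExcl [] r).filter (fun y => decide (y ∈ v ++ [x])) := by
        refine List.filter_congr ?_
        intro y hy
        have hyr : y ∈ r := ((mem_dExcl r [] y).mp hy).1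
        have : y ≠ x := fun c => hxr (c ▸ hyr)
        simp [this]
      have e2 : v.filter (fun y => !decide (y ∈ r)) ++ [x] = (v ++ [x]).filter (fun y => !decide (y ∈ r)) := by
        simp [List.filter_append, hxr]
      rw [List.append_assoc, e2, e1, ih (v ++ [x]) hnd']
      simp [List.append_assoc]

-- the rank dict built with setdefault looks up as rkey
theorem rank_get? (r : List Int) : ∀ (s : Int) (d : PySem.Dict Int Int) (p : Int),
    PySem.Dict.get? ((PySem.List.enumerate r s).foldl (fun d ix => PySem.Dict.setdefault d ix.2 ix.1) d) p
      = (PySem.Dict.get? d p).or ((PySem.List.index? r p).map (fun n : Nat => s + (n : Int))) := by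
  induction r with
  | nil => intro s d p; simp [PySem.List.enumerate, PySem.List.index?]
  | cons x t ih =>
    intro s d p
    have henum : PySem.List.enumerate (x :: t) s = (s, x) :: PySem.List.enumerate t (s + 1) := rfl
    rw [henum, List.foldl_cons]
    by_cases hc : PySem.Dict.contains d x = true
    · rw [PySem.Dict.setdefault_of_contains _ _ hc, ih]
      by_cases hxp : x = p
      · subst hxp
        have : (PySem.Dict.get? d x).isSome = true := by
          rw [← PySem.Dict.contains_eq_isSome_get?]; exact hc
        obtain ⟨w, hw⟩ := Option.isSome_iff_exists.mp this
        simp [hw]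
      · rw [PySem.List.index?_cons_of_ne t hxp]
        cases hi : PySem.List.index? t p <;> simp [hi]
        ring_nf
    · rw [PySem.Dict.setdefault_of_not_contains _ _ (by simpa using hc), ih]
      by_cases hxp : x = p
      · subst hxp
        have hnone : PySem.Dict.get? d x = none := by
          cases h : PySem.Dict.get? d x with
          | none => rfl
          | some w =>
            exfalso
            have : PySem.Dict.contains d x = true := by
              rw [PySem.Dict.contains_eq_isSome_get?, h]; rfl
            exact absurd this (by simpa using hc)
        rw [PySem.Dict.get?_insert_self, hnone, PySem.List.index?_cons_self]
        simp
      · rw [PySem.Dict.get?_insert_of_ne _ _ (fun c => hxp c.symm), PySem.List.index?_cons_of_ne t hxp]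
        cases hi : PySem.List.index? t p <;> simp [hi]
        ring_nf

theorem rank_getD_eq_rkey (r : List Int) (p : Int) :
    PySem.Dict.getD ((PySem.List.enumerate r 0).foldl (fun d ix => PySem.Dict.setdefault d ix.2 ix.1) PySem.Dict.empty) p (r.length : Int)
      = rkey r p := by
  rw [PySem.Dict.getD, rank_get?]
  have hemp : PySem.Dict.get? (PySem.Dict.empty : PySem.Dict Int Int) p = none := rfl
  rw [hemp]
  simp only [rkey]
  cases hi : PySem.List.index? r p with
  | none => rfl
  | some n => simp

-- A's pref loop: first occurrences of redis_alive restricted to pids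
theorem pref_fold (r : List Int) (sset : PySem.Set Int) : ∀ (s : PySem.Set Int) (out : List Int),
    r.foldl (fun (acc : PySem.Set Int × List Int) x =>
        if PySem.Set.contains sset x && !PySem.Set.contains acc.1 x then
          (PySem.Set.add acc.1 x, acc.2 ++ [x]) else acc) (s, out)
      = (s ++ dExcl s (r.filter (fun x => PySem.Set.contains sset x)),
         out ++ dExcl s (r.filter (fun x => PySem.Set.contains sset x))) := by
  induction r with
  | nil => intro s out; simp [dExcl]
  | cons x t ih =>
    intro s out
    rw [List.foldl_cons]
    by_cases hc : PySem.Set.contains sset x = true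
    · by_cases hs : x ∈ s
      · have : PySem.Set.contains s x = true := by simpa [PySem.Set.contains] using hs
        rw [if_neg (by simp; exact fun _ => hs), ih, List.filter_cons, if_pos hc, dExcl, if_pos hs]
      · have hcs : PySem.Set.contains s x = false := by simpa [PySem.Set.contains] using hs
        have hadd : PySem.Set.add s x = s ++ [x] := by simp [PySem.Set.add, PySem.Set.contains, hs]
        rw [if_pos (by simp at hc ⊢; exact ⟨hc, hs⟩), hadd, ih, List.filter_cons, if_pos hc, dExcl, if_neg hs,
          dExcl_congr _ (s ++ [x]) (x :: s) (by intro a; simp [List.mem_append, List.mem_cons, or_comm])]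
        simp [List.append_assoc]
    · rw [if_neg (by simp at hc ⊢; exact fun hx => absurd hx hc), ih, List.filter_cons, if_neg hc]

-- A's rest loop: first occurrences of pids not already seen
theorem rest_fold (l : List Int) : ∀ (s : PySem.Set Int) (out : List Int),
    l.foldl (fun (acc : PySem.Set Int × List Int) p =>
        if PySem.Set.contains acc.1 p then acc
        else (PySem.Set.add acc.1 p, acc.2 ++ [p])) (s, out)
      = (s ++ dExcl s l, out ++ dExcl s l) := by
  induction l with
  | nil => intro s out; simp [dExcl]
  | cons x t ih =>
    intro s out
    rw [List.foldl_cons]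
    by_cases hs : x ∈ s
    · have : PySem.Set.contains s x = true := by simpa [PySem.Set.contains] using hs
      rw [if_pos (by simpa using hs), ih, dExcl, if_pos hs]
    · have hcs : PySem.Set.contains s x = false := by simpa [PySem.Set.contains] using hs
      have hadd : PySem.Set.add s x = s ++ [x] := by simp [PySem.Set.add, PySem.Set.contains, hs]
      rw [if_neg (by simpa using hs), hadd, ih, dExcl, if_neg hs,
        dExcl_congr _ (s ++ [x]) (x :: s) (by intro a; simp [List.mem_append, List.mem_cons, or_comm])]
      simp [List.append_assoc]

-- both branches of A equal the one B expression
theorem core_eq (pids r : List Int) :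
    PySem.List.sorted (PySem.List.dedup pids)
        (fun p => PySem.Dict.getD ((PySem.List.enumerate r 0).foldl
            (fun d ix => PySem.Dict.setdefault d ix.2 ix.1) PySem.Dict.empty) p (r.length : Int)) false
      = (dExcl [] r).filter (fun x => decide (x ∈ pids))
        ++ (dExcl [] pids).filter (fun x => !decide (x ∈ r)) := by
  have hkey : (fun p => PySem.Dict.getD ((PySem.List.enumerate r 0).foldl
      (fun d ix => PySem.Dict.setdefault d ix.2 ix.1) PySem.Dict.empty) p (r.length : Int)) = rkey r := by
    funext p; exact rank_getD_eq_rkey r p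
  rw [hkey, PySem.List.sorted_eq_foldl_insertBy, dedup_eq_dExcl]
  have h := sort_fold r (dExcl [] pids) [] (by simpa using nodup_dExcl pids [])
  have h0 : List.filter (fun x => decide (x ∈ ([] : List Int))) (dExcl [] r) = [] := by simp
  simp only [List.nil_append, List.filter_nil, h0] at h
  rw [h]
  congr 1
  refine List.filter_congr ?_
  intro a _
  simp [mem_dExcl]

-- the whole else-branch of A equals B's sort expression, truncated
theorem else_eq (pids r : List Int) (e : Int) :
    (if (((r.foldl (fun (acc : PySem.Set Int × List Int) x =>
            if PySem.Set.contains (PySem.Set.ofList pids) x && !PySem.Set.contains acc.1 x then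
              (PySem.Set.add acc.1 x, acc.2 ++ [x]) else acc) (PySem.Set.empty, [])).2.length : Int)) ≥ e then
       (r.foldl (fun (acc : PySem.Set Int × List Int) x =>
            if PySem.Set.contains (PySem.Set.ofList pids) x && !PySem.Set.contains acc.1 x then
              (PySem.Set.add acc.1 x, acc.2 ++ [x]) else acc) (PySem.Set.empty, [])).2.take e.toNat
     else
       ((r.foldl (fun (acc : PySem.Set Int × List Int) x =>
            if PySem.Set.contains (PySem.Set.ofList pids) x && !PySem.Set.contains acc.1 x then
              (PySem.Set.add acc.1 x, acc.2 ++ [x]) else acc) (PySem.Set.empty, [])).2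
        ++ (pids.foldl (fun (acc : PySem.Set Int × List Int) p =>
              if PySem.Set.contains acc.1 p then acc
              else (PySem.Set.add acc.1 p, acc.2 ++ [p]))
            ((r.foldl (fun (acc : PySem.Set Int × List Int) x =>
                if PySem.Set.contains (PySem.Set.ofList pids) x && !PySem.Set.contains acc.1 x then
                  (PySem.Set.add acc.1 x, acc.2 ++ [x]) else acc) (PySem.Set.empty, [])).1, [])).2).take e.toNat)
    = (PySem.List.sorted (PySem.List.dedup pids)
        (fun p => PySem.Dict.getD ((PySem.List.enumerate r 0).foldl
            (fun d ix => PySem.Dict.setdefault d ix.2 ix.1) PySem.Dict.empty) p (r.length : Int)) false).take e.toNat := by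
  have hfn : (fun x => PySem.Set.contains (PySem.Set.ofList pids) x) = (fun x => decide (x ∈ pids)) := by
    funext a
    by_cases h : a ∈ pids <;>
      simp [PySem.Set.contains, PySem.Set.mem_ofList, h]
  have hP : dExcl [] (r.filter (fun x => decide (x ∈ pids)))
      = (dExcl [] r).filter (fun x => decide (x ∈ pids)) :=
    dExcl_filter r _ [] [] (by simp)
  have hseenmem : ∀ a, a ∈ (dExcl [] r).filter (fun x => decide (x ∈ pids)) ↔ a ∈ r ∧ a ∈ pids := by
    intro a
    simp [List.mem_filter, mem_dExcl]
  have hrest : dExcl ((dExcl [] r).filter (fun x => decide (x ∈ pids))) pids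
      = (dExcl [] pids).filter (fun x => !decide (x ∈ r)) := by
    have h1 := dExcl_eq_filter_not_mem pids [] ((dExcl [] r).filter (fun x => decide (x ∈ pids)))
    rw [List.nil_append] at h1
    rw [h1]
    refine List.filter_congr ?_
    intro a ha
    have hap : a ∈ pids := ((mem_dExcl pids [] a).mp ha).1
    by_cases har : a ∈ r
    · simp [hseenmem, har, hap]
    · simp [hseenmem, har]
  rw [pref_fold r (PySem.Set.ofList pids) PySem.Set.empty []]
  have hempty : (PySem.Set.empty : PySem.Set Int) = [] := rfl
  simp only [hempty, List.nil_append]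
  rw [rest_fold pids]
  simp only [List.nil_append]
  rw [hfn, hP, hrest, core_eq]
  by_cases hge : ((((dExcl [] r).filter (fun x => decide (x ∈ pids))).length : Int)) ≥ e
  · rw [if_pos hge, List.take_append_of_le_length (Int.toNat_le.mpr hge)]
  · rw [if_neg hge]

-- ===== VERDICT (by name: the statement is the Claim_ definition above) =====
theorem cap_pids_to_num_processes_py_spec : Claim_equal_cap_pids_to_num_processes_py := by
  intro pids config redis_alive _ _
  unfold Spec_cap_pids_to_num_processes_py
  unfold cap_pids_to_num_processes_py cap_pids_to_num_processes_py_alt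
  simp only []
  set vs := PySem.Dict.getD ⟨config.getD []⟩ "num_processes" "1" with hvs
  set e : Int := max 1 (if vs = "" then 1 else (PySem.Int.ofStr? vs).getD 1) with he
  by_cases hle : (pids.length : Int) ≤ e
  · rw [if_pos hle, if_pos hle]
  · rw [if_neg hle, if_neg hle]
    exact else_eq pids redis_alive e
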